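-- pv_equiv track=rewrite | github.com/cuhauwhung/leetcode | 809.expressive-words.py | check
-- ===== SOURCE A (Python) =====
-- def check(S, W):
--
--     i, j, i2, j2, n, m = 0, 0, 0, 0, len(S), len(W)
--     while i < n and j < m:
--
--         if S[i] != W[j]: return False
--         while i2 < n and S[i] == S[i2]: i2 += 1
--         while j2 < m and W[j] == W[j2]: j2 += 1
--
--         # if there is difference between dist_J and dist_S
--         # if dist_S is < max(3, dist_J)
--         if i2 - i != j2 - j and i2 - i < max(3, j2 - j):
--             return False
--
--         i = i2
--         j = j2
--
--     return i == n and j == m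
-- ===== SOURCE B (Python) =====
-- def _groups(s):
--     groups = []
--     i = 0
--     while i < len(s):
--         k = i + 1
--         while k < len(s) and s[k] == s[i]:
--             k += 1
--         groups.append((s[i], k - i))
--         i = k
--     return groups
--
--
-- def check(S, W):
--     gs = _groups(S)
--     gw = _groups(W)
--     if len(gs) != len(gw):
--         return False
--     for (sc, sn), (wc, wn) in zip(gs, gw):
--         if sc != wc or not (sn == wn or (sn >= 3 and sn >= wn)):
--             return False
--     return True
-- ===== Notes on version B (the rewrite author's own statement) =====
-- stated objective: alternative
-- what changed: Replaces A's interleaved two-pointer scan (which checks each run pair inline while walking both strings) with a build-then-compare decomposition: run-length-encode S and W separately, compare group-list lengths, then check each zipped (char,count) pair.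
import Mathlib
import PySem

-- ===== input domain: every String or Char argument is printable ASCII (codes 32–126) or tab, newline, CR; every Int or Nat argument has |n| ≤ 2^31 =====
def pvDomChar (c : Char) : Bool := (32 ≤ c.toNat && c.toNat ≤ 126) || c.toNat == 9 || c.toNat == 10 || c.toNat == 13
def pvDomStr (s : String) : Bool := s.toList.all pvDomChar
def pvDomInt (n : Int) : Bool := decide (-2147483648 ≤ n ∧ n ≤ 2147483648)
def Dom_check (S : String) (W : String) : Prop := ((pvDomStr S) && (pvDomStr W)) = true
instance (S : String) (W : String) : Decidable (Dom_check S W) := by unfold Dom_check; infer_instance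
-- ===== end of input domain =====

-- B rebuilds the same answer by a different decomposition: run-length encode both
-- strings first, then compare the two group tables pairwise (objective: alternative).

-- length of the leading run of character c (used by both ports' inner scans)
def countRun (c : Char) : List Char → Nat
  | [] => 0
  | x :: t => if x = c then countRun c t + 1 else 0

-- ===== PORT A =====
-- A's outer while consumes one run of each string per iteration; the two inner
-- whiles advance i2/j2 to the end of the current run (= countRun), and the loop
-- state (suffixes from i and j) is carried as the two lists.
def goA : List Char → List Char → Bool
  | [], [] => true                      -- i == n and j == m
  | [], _ :: _ => false
  | _ :: _, [] => false
  | a :: s', b :: w' =>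
    if a ≠ b then false
    else
      let ds := countRun a (a :: s')   -- i2 - i
      let dw := countRun b (b :: w')   -- j2 - j
      if ds ≠ dw ∧ ds < max 3 dw then false
      else goA (List.drop ds (a :: s')) (List.drop dw (b :: w'))
termination_by s _ => s.length
decreasing_by
  simp only [List.length_drop, List.length_cons, countRun, if_pos]
  omega

def check (S : String) (W : String) : Bool := goA S.toList W.toList

-- ===== PORT B =====
-- _groups of Source B: run-length encoding, one (char, runLength) pair per run
def rle : List Char → List (Char × Nat)
  | [] => []
  | a :: t =>
    let k := countRun a (a :: t)
    (a, k) :: rle (List.drop k (a :: t))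
termination_by s => s.length
decreasing_by
  simp only [List.length_drop, List.length_cons, countRun, if_pos]
  omega

def pairOK (p : (Char × Nat) × (Char × Nat)) : Bool :=
  p.1.1 == p.2.1 && (p.1.2 == p.2.2 || (3 ≤ p.1.2 && p.2.2 ≤ p.1.2))

def check_alt (S : String) (W : String) : Bool :=
  let gs := rle S.toList
  let gw := rle W.toList
  if gs.length = gw.length then (gs.zip gw).all pairOK else false

-- ===== PRECONDITION & SPEC =====
def Spec_check (S : String) (W : String) (out : Bool) : Prop := out = check_alt S W
instance (S : String) (W : String) (out : Bool) : Decidable (Spec_check S W out) := by unfold Spec_check; infer_instance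

-- ===== CLAIM (what is proved, stated in full; the proofs are below) =====
def Claim_equal_check : Prop := ∀ (S : String) (W : String), Dom_check S W → Spec_check S W (check S W)

-- ===== LEMMAS AND PROOFS =====

theorem goA_eq_rle (s w : List Char) :
    goA s w =
      (if (rle s).length = (rle w).length
       then ((rle s).zip (rle w)).all pairOK else false) := by
  fun_induction goA s w with
  | case1 => simp [rle]
  | case2 b w' => rw [rle, rle]; simp
  | case3 a s' => rw [rle, rle]; simp
  | case4 a s' b w' hne =>
    rw [rle, rle]
    simp only [List.length_cons, List.zip_cons_cons, List.all_cons, pairOK]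
    have hab : (a == b) = false := by simp [hne]
    simp [hab]
  | case5 a s' b w' hne ds dw hrej =>
    have hds : ds = countRun a (a :: s') := rfl
    have hdw : dw = countRun b (b :: w') := rfl
    rw [rle, rle]
    simp only [List.length_cons, List.zip_cons_cons, List.all_cons, pairOK]
    rw [hds, hdw] at hrej
    have h1 : (countRun a (a :: s') == countRun b (b :: w')) = false := by
      simp [hrej.1]
    have h2 : (3 ≤ countRun a (a :: s') && countRun b (b :: w') ≤ countRun a (a :: s')) = false := by
      have := hrej.2
      simp only [Bool.and_eq_false_iff, decide_eq_false_iff_not, not_le]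
      omega
    simp [h1, h2]
  | case6 a s' b w' hne ds dw hrej ih =>
    have hab : a = b := by by_contra h; exact hne h
    subst hab
    have hds : ds = countRun a (a :: s') := rfl
    have hdw : dw = countRun a (a :: w') := rfl
    rw [hds, hdw] at hrej ih ⊢
    rw [rle, rle]
    simp only [List.length_cons, List.zip_cons_cons, List.all_cons, pairOK]
    have hok : ((a == a) && ((countRun a (a :: s') == countRun a (a :: w')) ||
        (3 ≤ countRun a (a :: s') && countRun a (a :: w') ≤ countRun a (a :: s')))) = true := by
      rcases not_and_or.mp hrej with h | h
      · simp_all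
      · push Not at h
        have h3 : 3 ≤ countRun a (a :: s') := le_trans (le_max_left _ _) h
        have h4 : countRun a (a :: w') ≤ countRun a (a :: s') := le_trans (le_max_right _ _) h
        simp [h3, h4]
    rw [ih]
    split <;> split <;> simp_all

theorem check_spec_aux (S W : String) : check S W = check_alt S W := by
  simpa [check, check_alt] using goA_eq_rle S.toList W.toList

-- ===== VERDICT (by name: the statement is the Claim_ definition above) =====
theorem check_spec : Claim_equal_check := by
  intro S W _
  exact check_spec_aux S W
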